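-- pv_equiv track=rewrite | github.com/abstrask/advent-of-code | 2022/07/part1.py | get_dir_tot_size
-- ===== SOURCE A (Python) =====
-- def get_dir_tot_size(dir_size):
--     tot_size = {}
--     for path in dir_size.keys():
--         for i, (k, v) in enumerate(dir_size.items()):
--             if k.startswith(path):
--                 if path in tot_size.keys():
--                     tot_size[path] += v
--                 else:
--                     tot_size[path] = v
--     return tot_size
-- ===== SOURCE B (Python) =====
-- def get_dir_tot_size(dir_size):
--     # One pass over the items: each value is credited to every prefix of its
--     # key that is itself a key, instead of re-scanning all items per path.
--     tot = {}
--     for k, v in dir_size.items():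
--         for i in range(len(k) + 1):
--             p = k[:i]
--             if p in dir_size:
--                 tot[p] = tot.get(p, 0) + v
--     return {path: tot[path] for path in dir_size}
-- ===== Notes on version B (the rewrite author's own statement) =====
-- stated objective: faster
-- what changed: Instead of rescanning all n items for every path (checking startswith each time), B makes one pass over the items and credits each value to every prefix of its key that is itself a key (dict-membership test per prefix), then emits the totals in key order.
import Mathlib
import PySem

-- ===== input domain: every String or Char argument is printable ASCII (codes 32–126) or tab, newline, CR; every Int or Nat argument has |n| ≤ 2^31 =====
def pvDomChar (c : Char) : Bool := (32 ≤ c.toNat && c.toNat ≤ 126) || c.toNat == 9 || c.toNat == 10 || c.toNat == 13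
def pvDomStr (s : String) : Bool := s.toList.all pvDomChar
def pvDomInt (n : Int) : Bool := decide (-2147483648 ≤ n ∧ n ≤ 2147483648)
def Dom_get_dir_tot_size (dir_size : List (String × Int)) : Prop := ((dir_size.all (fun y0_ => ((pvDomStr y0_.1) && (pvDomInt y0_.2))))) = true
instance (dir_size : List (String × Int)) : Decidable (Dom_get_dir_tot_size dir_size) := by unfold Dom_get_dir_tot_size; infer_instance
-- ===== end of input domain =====

-- B replaces A's per-path rescan of all items by one pass that credits each value
-- to every prefix of its key that is itself a key (objective: faster).


-- ===== PORT A =====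
-- for path in dir_size.keys(): for (k, v) in dir_size.items(): if k.startswith(path): tot_size[path] += v (insert on first hit)
def get_dir_tot_size (dir_size : List (String × Int)) : List (String × Int) :=
  ((dir_size.map Prod.fst).foldl (fun tot path =>
      dir_size.foldl (fun tot kv =>
        if PySem.Str.startswith kv.1 path then
          if tot.contains path then tot.insert path (tot.getD path 0 + kv.2)
          else tot.insert path kv.2
        else tot) tot)
    PySem.Dict.empty).items

-- ===== PORT B =====
-- one pass: for (k, v) in items, for i in range(len(k)+1): p = k[:i]; if p in dir_size: tot[p] = tot.get(p, 0) + v;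
-- then {path: tot[path] for path in dir_size} (every key is its own prefix, so tot[path] is present: ported as getD _ 0)
def get_dir_tot_size_alt (dir_size : List (String × Int)) : List (String × Int) :=
  let keys := dir_size.map Prod.fst
  let tot := dir_size.foldl (fun tot kv =>
      (PySem.List.pyRange 0 (PySem.Str.len kv.1 + 1) 1).foldl (fun tot i =>
        if keys.contains (PySem.Str.slice kv.1 (some 0) (some i)) then
          tot.insert (PySem.Str.slice kv.1 (some 0) (some i))
            (tot.getD (PySem.Str.slice kv.1 (some 0) (some i)) 0 + kv.2)
        else tot) tot)
    PySem.Dict.empty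
  (keys.foldl (fun out path => out.insert path (tot.getD path 0)) PySem.Dict.empty).items

-- ===== PRECONDITION & SPEC =====
-- Pre_: the argument is a Python dict, whose keys are distinct by construction; association lists
-- with duplicate keys do not represent any dict input of A, so they are excluded.
def Pre_get_dir_tot_size (dir_size : List (String × Int)) : Prop := (dir_size.map Prod.fst).Nodup
instance (dir_size : List (String × Int)) : Decidable (Pre_get_dir_tot_size dir_size) := by
  unfold Pre_get_dir_tot_size; infer_instance

def pvWitness_get_dir_tot_size : (List (String × Int)) := [("/", 10), ("/a", 3), ("/a/b", 4), ("/ab", 5)]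

def Spec_get_dir_tot_size (dir_size : List (String × Int)) (out : List (String × Int)) : Prop := out = get_dir_tot_size_alt dir_size
instance (dir_size : List (String × Int)) (out : List (String × Int)) : Decidable (Spec_get_dir_tot_size dir_size out) := by unfold Spec_get_dir_tot_size; infer_instance

-- ===== CLAIM (what is proved, stated in full; the proofs are below) =====
def Claim_equal_get_dir_tot_size : Prop := ∀ (dir_size : List (String × Int)), Dom_get_dir_tot_size dir_size → Pre_get_dir_tot_size dir_size → Spec_get_dir_tot_size dir_size (get_dir_tot_size dir_size)

-- ===== LEMMAS AND PROOFS =====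

-- total size of q: sum of the values whose key starts with q
def totOf (dir_size : List (String × Int)) (q : String) : Int :=
  ((dir_size.filter (fun kv => PySem.Str.startswith kv.1 q)).map (fun kv => kv.2)).sum

theorem totOf_cons (kv : String × Int) (l : List (String × Int)) (q : String) :
    totOf (kv :: l) q = (if PySem.Str.startswith kv.1 q = true then kv.2 else 0) + totOf l q := by
  unfold totOf
  rw [List.filter_cons]
  by_cases hs : PySem.Str.startswith kv.1 q = true
  · rw [if_pos hs, if_pos hs]
    simp only [List.map_cons, List.sum_cons]
  · rw [if_neg hs, if_neg hs]
    ring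

theorem keys_insert_eq_add {ν : Type} (d : PySem.Dict String ν) (k : String) (v : ν) :
    (d.insert k v).keys = PySem.Set.add d.keys k := by
  by_cases h : d.contains k = true
  · have hk : k ∈ d.keys := of_decide_eq_true (by rw [← PySem.Dict.contains_eq_decide_mem_keys]; exact h)
    rw [PySem.Dict.keys_insert_of_contains d v h]
    unfold PySem.Set.add PySem.Set.contains
    simp [hk]
  · have h' : d.contains k = false := by simpa using h
    have hk : k ∉ d.keys := by
      rw [PySem.Dict.contains_eq_decide_mem_keys] at h'
      simpa using h'
    rw [PySem.Dict.keys_insert_of_not_contains d v h']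
    unfold PySem.Set.add PySem.Set.contains
    simp [hk]

theorem add_of_mem {s : PySem.Set String} {p : String} (h : p ∈ s) : PySem.Set.add s p = s := by
  unfold PySem.Set.add PySem.Set.contains
  simp [h]

theorem mem_add_self (s : PySem.Set String) (p : String) : p ∈ PySem.Set.add s p := by
  rw [PySem.Set.mem_add]; right; rfl

-- === A-side: the inner loop (one fixed path) ===

theorem innerA_getD (l : List (String × Int)) (path q : String) (d : PySem.Dict String Int) :
    (l.foldl (fun tot kv =>
        if PySem.Str.startswith kv.1 path then
          if tot.contains path then tot.insert path (tot.getD path 0 + kv.2)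
          else tot.insert path kv.2
        else tot) d).getD q 0
      = d.getD q 0 + (if q = path then totOf l q else 0) := by
  induction l generalizing d with
  | nil => simp [totOf]
  | cons kv l ih =>
    simp only [List.foldl_cons]
    by_cases hs : PySem.Str.startswith kv.1 path = true
    · rw [if_pos hs]
      by_cases hc : (d.contains path) = true
      · rw [if_pos hc, ih]
        by_cases hq : q = path
        · subst hq
          rw [if_pos rfl, if_pos rfl, totOf_cons, if_pos hs, PySem.Dict.getD_insert]
          rw [if_pos rfl]
          ring
        · rw [if_neg hq, if_neg hq, PySem.Dict.getD_insert, if_neg hq]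
      · rw [if_neg hc, ih]
        have hc' : d.contains path = false := by simpa using hc
        by_cases hq : q = path
        · subst hq
          rw [if_pos rfl, if_pos rfl, totOf_cons, if_pos hs, PySem.Dict.getD_insert]
          rw [if_pos rfl, PySem.Dict.getD_of_not_contains d 0 hc']
          ring
        · rw [if_neg hq, if_neg hq, PySem.Dict.getD_insert, if_neg hq]
    · rw [if_neg hs, ih]
      by_cases hq : q = path
      · subst hq
        rw [if_pos rfl, if_pos rfl, totOf_cons, if_neg hs]
        ring
      · rw [if_neg hq, if_neg hq]

theorem innerA_keys (l : List (String × Int)) (path : String) (d : PySem.Dict String Int) :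
    (l.foldl (fun tot kv =>
        if PySem.Str.startswith kv.1 path then
          if tot.contains path then tot.insert path (tot.getD path 0 + kv.2)
          else tot.insert path kv.2
        else tot) d).keys
      = if l.any (fun kv => PySem.Str.startswith kv.1 path) then PySem.Set.add d.keys path
        else d.keys := by
  induction l generalizing d with
  | nil => simp
  | cons kv l ih =>
    simp only [List.foldl_cons, List.any_cons]
    by_cases hs : PySem.Str.startswith kv.1 path = true
    · rw [if_pos hs]
      have hkeys : ∀ (d' : PySem.Dict String Int), d'.keys = PySem.Set.add d.keys path →
          (l.foldl (fun tot kv =>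
            if PySem.Str.startswith kv.1 path then
              if tot.contains path then tot.insert path (tot.getD path 0 + kv.2)
              else tot.insert path kv.2
            else tot) d').keys = PySem.Set.add d.keys path := by
        intro d' hd'
        rw [ih d', hd']
        by_cases ha : l.any (fun kv => PySem.Str.startswith kv.1 path) = true
        · rw [if_pos ha, add_of_mem (mem_add_self _ _)]
        · rw [if_neg ha]
      have hcond : ((PySem.Str.startswith kv.1 path || l.any fun kv => PySem.Str.startswith kv.1 path) : Bool) = true := by
        rw [hs]; simp
      rw [if_pos hcond]
      by_cases hc : (d.contains path) = true
      · rw [if_pos hc]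
        exact hkeys _ (by rw [keys_insert_eq_add])
      · rw [if_neg hc]
        exact hkeys _ (by rw [keys_insert_eq_add])
    · rw [if_neg hs, ih]
      have hs' : PySem.Str.startswith kv.1 path = false := by simpa using hs
      simp only [hs', Bool.false_or]

-- every key starts with itself
theorem startswith_self (s : String) : PySem.Str.startswith s s = true := by
  unfold PySem.Str.startswith PySem.Chars.startswith
  exact List.isPrefixOf_iff_prefix.mpr (List.prefix_refl _)

-- === A-side: the outer loop over the key list ===

theorem outerA (dir_size : List (String × Int)) (ps : List String) (d : PySem.Dict String Int)
    (hps : ∀ p ∈ ps, ∃ kv ∈ dir_size, kv.1 = p) (q : String) :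
    ((ps.foldl (fun tot path =>
        dir_size.foldl (fun tot kv =>
          if PySem.Str.startswith kv.1 path then
            if tot.contains path then tot.insert path (tot.getD path 0 + kv.2)
            else tot.insert path kv.2
          else tot) tot) d).getD q 0
        = d.getD q 0 + (ps.count q : Int) * totOf dir_size q)
    ∧ (ps.foldl (fun tot path =>
        dir_size.foldl (fun tot kv =>
          if PySem.Str.startswith kv.1 path then
            if tot.contains path then tot.insert path (tot.getD path 0 + kv.2)
            else tot.insert path kv.2
          else tot) tot) d).keys = PySem.Set.update d.keys ps := by
  induction ps generalizing d with
  | nil => simp [PySem.Set.update_nil]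
  | cons p ps ih =>
    have hp : dir_size.any (fun kv => PySem.Str.startswith kv.1 p) = true := by
      obtain ⟨kv, hkv, hfst⟩ := hps p (by simp)
      exact List.any_eq_true.mpr ⟨kv, hkv, by rw [hfst]; exact startswith_self p⟩
    have hps' : ∀ x ∈ ps, ∃ kv ∈ dir_size, kv.1 = x := fun x hx => hps x (by simp [hx])
    simp only [List.foldl_cons]
    obtain ⟨ihg, ihk⟩ := ih _ hps'
    constructor
    · rw [ihg, innerA_getD, List.count_cons]
      by_cases hq : q = p
      · subst hq
        rw [if_pos rfl, if_pos (beq_self_eq_true q)]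
        push_cast
        ring
      · rw [if_neg hq, if_neg (fun h : (p == q) = true => hq (beq_iff_eq.mp h).symm)]
        push_cast
        ring
    · rw [ihk, innerA_keys, if_pos hp, PySem.Set.update_cons]

-- === generic: getD of a conditional-insert accumulation loop ===

theorem getD_condfold {α : Type} (l : List α)
    (f : PySem.Dict String Int → α → PySem.Dict String Int)
    (c : α → Bool) (key : α → String) (w : α → Int)
    (hf : ∀ tot x, f tot x = if c x then tot.insert (key x) (tot.getD (key x) 0 + w x) else tot)
    (d : PySem.Dict String Int) (q : String) :
    (l.foldl f d).getD q 0
      = d.getD q 0 + ((l.filter (fun x => c x && (key x == q))).map w).sum := by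
  induction l generalizing d with
  | nil => simp
  | cons x l ih =>
    simp only [List.foldl_cons, List.filter_cons, hf]
    by_cases hc : c x = true
    · rw [if_pos hc, ih]
      by_cases hq : key x = q
      · subst hq
        have hcond : ((c x && (key x == key x)) : Bool) = true := by simp [hc]
        rw [if_pos hcond, List.map_cons, List.sum_cons, PySem.Dict.getD_insert, if_pos rfl]
        ring
      · have hcond : ¬ ((c x && (key x == q)) : Bool) = true := by simp [hq]
        rw [if_neg hcond, PySem.Dict.getD_insert, if_neg (fun h => hq h.symm)]
    · have hcond : ¬ ((c x && (key x == q)) : Bool) = true := by simp [hc]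
      rw [if_neg hc, if_neg hcond, ih]

-- === B-side: the inner loop over the prefixes of one key ===

theorem slice_prefix (s : String) (k : Nat) :
    PySem.Str.slice s (some 0) (some (k : Int)) = String.ofList (s.toList.take k) := by
  unfold PySem.Str.slice
  rw [PySem.Chars.slice_eq_listSlice]
  rw [PySem.List.slice_zero_start, PySem.List.slice_to_natCast]

theorem innerB_getD (keys : List String) (s : String) (v : Int) (q : String)
    (hq : q ∈ keys) (d : PySem.Dict String Int) :
    ((PySem.List.pyRange 0 (PySem.Str.len s + 1) 1).foldl (fun tot i =>
        if keys.contains (PySem.Str.slice s (some 0) (some i)) then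
          tot.insert (PySem.Str.slice s (some 0) (some i))
            (tot.getD (PySem.Str.slice s (some 0) (some i)) 0 + v)
        else tot) d).getD q 0
      = d.getD q 0 + (if PySem.Str.startswith s q then v else 0) := by
  have hlen : PySem.Str.len s = (s.toList.length : Int) := rfl
  have hrange : PySem.List.pyRange 0 (PySem.Str.len s + 1) 1
      = (List.range (s.toList.length + 1)).map (fun (k : Nat) => ((k : Int))) := by
    rw [PySem.List.pyRange_one, hlen]
    have h2 : ((s.toList.length : Int) + 1 - 0).toNat = s.toList.length + 1 := by omega
    rw [h2]
    simp only [zero_add]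
  rw [hrange, List.foldl_map]
  rw [getD_condfold (List.range (s.toList.length + 1)) _
      (fun k => keys.contains (PySem.Str.slice s (some 0) (some (k : Int))))
      (fun k => PySem.Str.slice s (some 0) (some (k : Int)))
      (fun _ => v) (fun tot x => rfl) d q]
  congr 1
  -- the filtered range is [len(q)] when q is a prefix of s (and a key), [] otherwise
  have hpred : ∀ k ∈ List.range (s.toList.length + 1),
      ((keys.contains (PySem.Str.slice s (some 0) (some (k : Int))) &&
        (PySem.Str.slice s (some 0) (some (k : Int)) == q)))
      = decide (k = q.toList.length ∧ q.toList <+: s.toList) := by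
    intro k hk
    have hk' : k ≤ s.toList.length := by simpa using Nat.lt_succ_iff.mp (List.mem_range.mp hk)
    rw [slice_prefix]
    by_cases heq : String.ofList (s.toList.take k) = q
    · have htake : s.toList.take k = q.toList := by
        rw [← heq, String.toList_ofList]
      have hklen : k = q.toList.length := by
        have h4 := congrArg List.length htake
        rw [List.length_take] at h4
        omega
      have hpre : q.toList <+: s.toList := htake ▸ List.take_prefix k s.toList
      rw [heq]
      simp [hq, hklen, hpre]
    · have hnot : ¬ (k = q.toList.length ∧ q.toList <+: s.toList) := by
        rintro ⟨hklen, hpre⟩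
        apply heq
        have h3 : s.toList.take k = q.toList := by
          rw [hklen]
          exact (List.prefix_iff_eq_take.mp hpre).symm
        rw [h3]
        exact String.ofList_toList
      have hL : (String.ofList (s.toList.take k) == q) = false :=
        beq_eq_false_iff_ne.mpr heq
      rw [hL, Bool.and_false, decide_eq_false hnot]
  rw [List.filter_congr hpred]
  by_cases hpre : q.toList <+: s.toList
  · have hlenle : q.toList.length < s.toList.length + 1 :=
      Nat.lt_succ_of_le (List.IsPrefix.length_le hpre)
    have hsw : PySem.Str.startswith s q = true := by
      unfold PySem.Str.startswith PySem.Chars.startswith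
      exact List.isPrefixOf_iff_prefix.mpr hpre
    have hfilt : (List.range (s.toList.length + 1)).filter
        (fun k => decide (k = q.toList.length ∧ q.toList <+: s.toList))
        = [q.toList.length] := by
      have h1 : ∀ k ∈ List.range (s.toList.length + 1),
          (decide (k = q.toList.length ∧ q.toList <+: s.toList))
          = decide (k = q.toList.length) := by
        intro k _; simp [hpre]
      rw [List.filter_congr h1, List.filter_eq, List.count_range, if_pos hlenle]
      simp
    rw [hfilt, hsw]
    simp
  · have hsw : PySem.Str.startswith s q = false := by
      unfold PySem.Str.startswith PySem.Chars.startswith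
      rw [Bool.eq_false_iff]
      exact fun h => hpre (List.isPrefixOf_iff_prefix.mp h)
    have hfilt : (List.range (s.toList.length + 1)).filter
        (fun k => decide (k = q.toList.length ∧ q.toList <+: s.toList)) = [] := by
      apply List.filter_eq_nil_iff.mpr
      intro k _
      simp [hpre]
    rw [hfilt, hsw]
    simp

-- === B-side: the outer loop over the items ===

theorem outerB (keys : List String) (l : List (String × Int)) (q : String) (hq : q ∈ keys)
    (d : PySem.Dict String Int) :
    (l.foldl (fun tot kv =>
        (PySem.List.pyRange 0 (PySem.Str.len kv.1 + 1) 1).foldl (fun tot i =>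
          if keys.contains (PySem.Str.slice kv.1 (some 0) (some i)) then
            tot.insert (PySem.Str.slice kv.1 (some 0) (some i))
              (tot.getD (PySem.Str.slice kv.1 (some 0) (some i)) 0 + kv.2)
          else tot) tot) d).getD q 0
      = d.getD q 0 + totOf l q := by
  induction l generalizing d with
  | nil => simp [totOf]
  | cons kv l ih =>
    simp only [List.foldl_cons]
    rw [ih, innerB_getD keys kv.1 kv.2 q hq, totOf_cons]
    ring

-- ===== VERDICT (by name: the statement is the Claim_ definition above) =====
theorem get_dir_tot_size_spec : Claim_equal_get_dir_tot_size := by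
  intro dir_size _ hpre
  unfold Spec_get_dir_tot_size
  unfold Pre_get_dir_tot_size at hpre
  unfold get_dir_tot_size get_dir_tot_size_alt
  set keys := dir_size.map Prod.fst with hkeys
  -- A's dict
  obtain ⟨hAg, hAk⟩ := outerA dir_size keys PySem.Dict.empty
    (by intro p hp; obtain ⟨kv, hkv, h⟩ := List.mem_map.mp hp; exact ⟨kv, hkv, h⟩) ""
  clear hAg
  set dA := keys.foldl (fun tot path =>
      dir_size.foldl (fun tot kv =>
        if PySem.Str.startswith kv.1 path then
          if tot.contains path then tot.insert path (tot.getD path 0 + kv.2)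
          else tot.insert path kv.2
        else tot) tot) PySem.Dict.empty with hdA
  have hAkeys : dA.keys = keys := by
    rw [hAk, PySem.Dict.keys_empty,
      PySem.Set.update_eq_append_of_disjoint [] keys hpre (by simp)]
    simp
  -- B's accumulated dict
  set dB := dir_size.foldl (fun tot kv =>
      (PySem.List.pyRange 0 (PySem.Str.len kv.1 + 1) 1).foldl (fun tot i =>
        if keys.contains (PySem.Str.slice kv.1 (some 0) (some i)) then
          tot.insert (PySem.Str.slice kv.1 (some 0) (some i))
            (tot.getD (PySem.Str.slice kv.1 (some 0) (some i)) 0 + kv.2)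
        else tot) tot) PySem.Dict.empty with hdB
  -- B's output dict is keys.map (q, dB.getD q 0)
  have hBitems : (keys.foldl (fun out path => out.insert path (dB.getD path 0))
      PySem.Dict.empty).items = keys.map (fun p => (p, dB.getD p 0)) := by
    have := PySem.Dict.items_foldl_insert_fresh keys (fun p => p) (fun p => dB.getD p 0)
      PySem.Dict.empty (by intro a _; exact PySem.Dict.contains_empty a)
      (by simpa using hpre)
    simpa using this
  -- A's output dict is keys.map (q, dA.getD q 0)
  have hAitems : dA.items = keys.map (fun p => (p, dA.getD p 0)) := by
    rw [PySem.Dict.items_eq_map_keys dA (by rw [hAkeys]; exact hpre) 0, hAkeys]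
  rw [hAitems, hBitems]
  apply List.map_congr_left
  intro q hqmem
  have hA : dA.getD q 0 = totOf dir_size q := by
    obtain ⟨hg, _⟩ := outerA dir_size keys PySem.Dict.empty
      (by intro p hp; obtain ⟨kv, hkv, h⟩ := List.mem_map.mp hp; exact ⟨kv, hkv, h⟩) q
    rw [← hdA] at hg
    rw [hg, PySem.Dict.getD_empty, List.count_eq_one_of_mem hpre hqmem]
    simp
  have hB : dB.getD q 0 = totOf dir_size q := by
    rw [hdB, outerB keys dir_size q hqmem, PySem.Dict.getD_empty]
    simp
  rw [hA, hB]
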